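-- pv_equiv track=rewrite | github.com/91LS/CW_2_num_py | tools.py | get_descriptor
-- ===== SOURCE A (Python) =====
-- import collections
--
-- def get_descriptor(concept_objects, attributes):
--     """Return mode descriptor from concept objects."""
--     mode_descriptor = {}
--     most_common = 0
--
--     for attribute in attributes:
--         column = get_concept_column(concept_objects, attribute)
--         mode = collections.Counter(column).most_common(1)  # out: [(value, count)]
--         if mode[0][1] > most_common:
--             most_common = mode[0][1]
--             mode_descriptor = {attribute: mode[0][0]}
--     return mode_descriptor
--
-- def get_concept_column(concept_objects, attribute):
--     """Generator for decision objects with decision."""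
--     column = []
--     for decision_object in concept_objects:
--         column.append(decision_object[attribute])
--     return column
-- ===== SOURCE B (Python) =====
-- import collections
--
-- def get_descriptor(concept_objects, attributes):
--     """Return mode descriptor from concept objects."""
--     # One row-major pass builds a per-attribute value->count table; a separate
--     # selection pass keeps the best (count, attribute, value) triple.
--     counts = {}
--     for decision_object in concept_objects:
--         for attribute, value in decision_object.items():
--             inner = counts.setdefault(attribute, {})
--             inner[value] = inner.get(value, 0) + 1
--
--     best = None
--     for attribute in attributes:
--         inner = counts[attribute]
--         value = max(inner, key=inner.get)
--         if best is None or inner[value] > best[0]: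
--             best = (inner[value], attribute, value)
--     return {} if best is None else {best[1]: best[2]}
-- ===== Notes on version B (the rewrite author's own statement) =====
-- stated objective: alternative
-- what changed: A rebuilds a value column and a fresh Counter plus most_common(1) for every attribute (column-major, one scan of concept_objects per attribute); B makes one row-major pass over concept_objects building a per-attribute value->count table, then a selection pass reads each precomputed table with max(dict, key=...) and keeps the best (count, attribute, value) triple in an Option-style accumulator instead of A's running dict.
import Mathlib
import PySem

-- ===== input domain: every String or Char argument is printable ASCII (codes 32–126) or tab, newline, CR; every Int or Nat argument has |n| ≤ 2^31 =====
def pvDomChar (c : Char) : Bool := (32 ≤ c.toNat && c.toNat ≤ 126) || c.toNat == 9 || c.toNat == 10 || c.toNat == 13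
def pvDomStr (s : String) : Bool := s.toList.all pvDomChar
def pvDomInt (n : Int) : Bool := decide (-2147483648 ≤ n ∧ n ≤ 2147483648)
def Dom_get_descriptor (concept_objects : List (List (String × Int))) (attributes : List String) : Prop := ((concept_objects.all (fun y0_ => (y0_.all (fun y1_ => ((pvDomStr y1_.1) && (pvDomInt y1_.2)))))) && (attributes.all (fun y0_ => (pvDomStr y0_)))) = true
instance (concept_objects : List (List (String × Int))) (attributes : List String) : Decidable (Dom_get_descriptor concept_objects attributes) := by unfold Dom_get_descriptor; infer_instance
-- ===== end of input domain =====

-- B replaces A's per-attribute column scans and Counter.most_common by ONE row-major pass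
-- building a per-attribute value→count table, then a selection pass keeping the best
-- (count, attribute, value) triple via max(dict, key=…) (objective: alternative decomposition).

-- ===== PORT A =====
-- Counter(column).most_common(1)[0] — the first item of maximal count (CPython's stable
-- descending sort keeps the first-inserted maximal item); none exactly when the counter is
-- empty (Python raises IndexError there, excluded by Pre_).
def pyMostCommon1? (items : List (Int × Int)) : Option (Int × Int) :=
  items.foldl (fun best p =>
    match best with
    | none => some p
    | some q => if p.2 > q.2 then some p else some q) none

-- decision_object[attribute]: first-match lookup; the default 0 is never read under
-- Pre_get_descriptor (a missing key is Python's KeyError, excluded by Pre_).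
def get_concept_column (concept_objects : List (List (String × Int))) (attr : String) : List Int :=
  concept_objects.foldl
    (fun column decision_object => column ++ [(PySem.Dict.mk decision_object).getD attr 0]) []

def get_descriptor (concept_objects : List (List (String × Int))) (attributes : List String) : List (String × Int) :=
  (attributes.foldl
    (fun (st : PySem.Dict String Int × Int) attr =>
      let column := get_concept_column concept_objects attr
      match pyMostCommon1? (PySem.Dict.counter column).items with
      | none => st                      -- mode[0] raises IndexError: excluded by Pre_
      | some m => if m.2 > st.2 then ((PySem.Dict.empty).insert attr m.1, m.2) else st)
    (PySem.Dict.empty, 0)).1.items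

-- ===== PORT B =====
-- Source B's counting pass: `inner = counts.setdefault(attribute, {}); inner[value] = inner.get(value, 0) + 1`
-- — the setdefault-then-in-place-update is ported as inserting the updated inner dict back
-- (exact: same resulting mapping and same key insertion order).
def bCounts (concept_objects : List (List (String × Int))) : PySem.Dict String (PySem.Dict Int Int) :=
  concept_objects.foldl
    (fun counts decision_object =>
      (PySem.Dict.mk decision_object).items.foldl
        (fun counts p =>
          counts.insert p.1 ((counts.getD p.1 PySem.Dict.empty).modify p.2 0 (· + 1)))
        counts)
    PySem.Dict.empty

def get_descriptor_alt (concept_objects : List (List (String × Int))) (attributes : List String) : List (String × Int) :=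
  let counts := bCounts concept_objects
  let best := attributes.foldl
    (fun (best : Option (Int × String × Int)) attr =>
      -- counts[attribute]: the default is never read under Pre_ (a missing key is KeyError)
      let inner := counts.getD attr PySem.Dict.empty
      -- max(inner, key=inner.get): first key of maximal count; none = ValueError, excluded by Pre_
      match PySem.List.max? inner.keys (fun v => inner.getD v 0) with
      | none => best
      | some v =>
        match best with
        | none => some (inner.getD v 0, attr, v)
        | some b => if inner.getD v 0 > b.1 then some (inner.getD v 0, attr, v) else best)
    none
  match best with
  | none => (PySem.Dict.empty : PySem.Dict String Int).items
  | some b => ((PySem.Dict.empty : PySem.Dict String Int).insert b.2.1 b.2.2).items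

-- ===== PRECONDITION & SPEC =====
-- Pre_ excludes exactly the inputs where Python A raises: empty concept_objects with nonempty
-- attributes (IndexError on mode[0]) and rows missing a requested attribute (KeyError); it also
-- excludes association lists with duplicate keys in a row, which do not represent a Python dict
-- (as Python literals those rows are lists of pairs and A raises TypeError on decision_object[attribute]).
def Pre_get_descriptor (concept_objects : List (List (String × Int))) (attributes : List String) : Prop :=
  (attributes ≠ [] → concept_objects ≠ []) ∧
  (∀ o ∈ concept_objects, (o.map Prod.fst).Nodup) ∧
  (∀ a ∈ attributes, ∀ o ∈ concept_objects, a ∈ o.map Prod.fst)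
instance (concept_objects : List (List (String × Int))) (attributes : List String) : Decidable (Pre_get_descriptor concept_objects attributes) := by unfold Pre_get_descriptor; infer_instance

def pvWitness_get_descriptor : (List (List (String × Int))) × List String :=
  ([[("a", 1), ("b", 2)], [("a", 1), ("b", 3)]], ["a", "b"])

def Spec_get_descriptor (concept_objects : List (List (String × Int))) (attributes : List String) (out : List (String × Int)) : Prop := out = get_descriptor_alt concept_objects attributes
instance (concept_objects : List (List (String × Int))) (attributes : List String) (out : List (String × Int)) : Decidable (Spec_get_descriptor concept_objects attributes out) := by unfold Spec_get_descriptor; infer_instance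

-- ===== CLAIM (what is proved, stated in full; the proofs are below) =====
def Claim_equal_get_descriptor : Prop := ∀ (concept_objects : List (List (String × Int))) (attributes : List String), Dom_get_descriptor concept_objects attributes → Pre_get_descriptor concept_objects attributes → Spec_get_descriptor concept_objects attributes (get_descriptor concept_objects attributes)

-- ===== LEMMAS AND PROOFS =====

-- pairs whose keys differ from a do not change the a-slot of the counts dict
lemma bcounts_row_untouched (a : String) (l : List (String × Int))
    (cs : PySem.Dict String (PySem.Dict Int Int))
    (h : ∀ p ∈ l, p.1 ≠ a) :
    (l.foldl (fun counts p =>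
        counts.insert p.1 ((counts.getD p.1 PySem.Dict.empty).modify p.2 0 (· + 1))) cs).getD a
        PySem.Dict.empty
      = cs.getD a PySem.Dict.empty := by
  induction l generalizing cs with
  | nil => rfl
  | cons p rest ih =>
      simp only [List.foldl_cons]
      rw [ih _ (fun q hq => h q (List.mem_cons_of_mem _ hq))]
      rw [PySem.Dict.getD_insert]
      have hne : ¬ (a = p.1) := fun heq => h p List.mem_cons_self heq.symm
      rw [if_neg hne]

-- one row with nodup keys containing a contributes exactly one increment at its first-match value
lemma bcounts_row (a : String) (l : List (String × Int))
    (cs : PySem.Dict String (PySem.Dict Int Int))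
    (hnd : (l.map Prod.fst).Nodup) (hmem : a ∈ l.map Prod.fst) :
    (l.foldl (fun counts p =>
        counts.insert p.1 ((counts.getD p.1 PySem.Dict.empty).modify p.2 0 (· + 1))) cs).getD a
        PySem.Dict.empty
      = (cs.getD a PySem.Dict.empty).modify ((PySem.Dict.mk l).getD a 0) 0 (· + 1) := by
  induction l generalizing cs with
  | nil => simp at hmem
  | cons p rest ih =>
      obtain ⟨k, w⟩ := p
      simp only [List.map_cons, List.nodup_cons] at hnd
      by_cases hpa : k = a
      · subst hpa
        have hrest : ∀ q ∈ rest, q.1 ≠ k := by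
          intro q hq hqa
          exact hnd.1 (hqa ▸ List.mem_map_of_mem (f := Prod.fst) hq)
        simp only [List.foldl_cons]
        rw [bcounts_row_untouched k rest _ hrest]
        rw [PySem.Dict.getD_insert, if_pos rfl]
        have hv : (PySem.Dict.mk ((k, w) :: rest)).getD k 0 = w := by
          simp [PySem.Dict.getD, PySem.Dict.get?_mk_cons]
        rw [hv]
      · have hmem' : a ∈ rest.map Prod.fst := by
          rcases List.mem_cons.mp hmem with h | h
          · exact absurd h.symm hpa
          · exact h
        simp only [List.foldl_cons]
        rw [ih _ hnd.2 hmem']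
        rw [PySem.Dict.getD_insert, if_neg (fun heq => hpa heq.symm)]
        have hv : (PySem.Dict.mk ((k, w) :: rest)).getD a 0 = (PySem.Dict.mk rest).getD a 0 := by
          simp [PySem.Dict.getD, PySem.Dict.get?_mk_cons, hpa]
        rw [hv]

-- the a-slot of the row-major counts fold is the fold of per-row first-match values
lemma bcounts_getD_foldl (a : String) (rows : List (List (String × Int)))
    (d : PySem.Dict String (PySem.Dict Int Int))
    (hnd : ∀ o ∈ rows, (o.map Prod.fst).Nodup)
    (hmem : ∀ o ∈ rows, a ∈ o.map Prod.fst) :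
    (rows.foldl (fun counts decision_object =>
        (PySem.Dict.mk decision_object).items.foldl
          (fun counts p =>
            counts.insert p.1 ((counts.getD p.1 PySem.Dict.empty).modify p.2 0 (· + 1)))
          counts) d).getD a PySem.Dict.empty
      = (rows.map (fun o => (PySem.Dict.mk o).getD a 0)).foldl
          (fun c x => c.modify x 0 (· + 1)) (d.getD a PySem.Dict.empty) := by
  induction rows generalizing d with
  | nil => rfl
  | cons o rest ih =>
      simp only [List.foldl_cons, List.map_cons]
      rw [ih _ (fun q hq => hnd q (List.mem_cons_of_mem _ hq))
            (fun q hq => hmem q (List.mem_cons_of_mem _ hq))]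
      rw [bcounts_row a o d (hnd o List.mem_cons_self) (hmem o List.mem_cons_self)]

-- the per-attribute table B reads equals the counter A builds from the column
lemma bcounts_eq_counter (concept_objects : List (List (String × Int))) (a : String)
    (hnd : ∀ o ∈ concept_objects, (o.map Prod.fst).Nodup)
    (hmem : ∀ o ∈ concept_objects, a ∈ o.map Prod.fst) :
    (bCounts concept_objects).getD a PySem.Dict.empty
      = PySem.Dict.counter (get_concept_column concept_objects a) := by
  have hcol : get_concept_column concept_objects a
      = concept_objects.map (fun o => (PySem.Dict.mk o).getD a 0) :=
    by
      unfold get_concept_column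
      simpa using PySem.List.foldl_append_singleton_eq_map
        (fun o => (PySem.Dict.mk o).getD a 0) concept_objects []
  rw [PySem.Dict.counter_eq_foldl, hcol]
  unfold bCounts
  rw [bcounts_getD_foldl a concept_objects PySem.Dict.empty hnd hmem]
  simp [PySem.Dict.getD_empty, List.foldl_map]

-- most_common(1)[0] over (k, f k) pairs IS max(keys, key=f) paired with its f-value
lemma mostCommon1_map (f : Int → Int) (l : List Int) :
    pyMostCommon1? (l.map (fun k => (k, f k)))
      = (PySem.List.max? l f).map (fun k => (k, f k)) := by
  unfold pyMostCommon1? PySem.List.max?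
  rw [List.foldl_map]
  have : ∀ (acc : Option Int),
      l.foldl (fun best k =>
        match best with
        | none => some (k, f k)
        | some q => if (k, f k).2 > q.2 then some (k, f k) else some q)
        (acc.map (fun k => (k, f k)))
      = (l.foldl (fun acc x =>
          match acc with
          | none => some x
          | some m => if f m < f x then some x else some m) acc).map
          (fun k => (k, f k)) := by
    intro acc
    induction l generalizing acc with
    | nil => rfl
    | cons x rest ih =>
        simp only [List.foldl_cons]
        cases acc with
        | none => exact ih (some x)
        | some m =>
            simp only [Option.map_some]
            by_cases h : f m < f x
            · rw [if_pos (show (x, f x).2 > (m, f m).2 from h), if_pos h]; exact ih (some x)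
            · rw [if_neg (show ¬ (x, f x).2 > (m, f m).2 from h), if_neg h]; exact ih (some m)
  have h := this none
  simp only [Option.map_none] at h
  convert h using 2
  congr 1
  funext acc x
  cases acc with
  | none => rfl
  | some m => rfl

-- A's per-attribute mode equals B's max over the table's keys, with its count ≥ 1
lemma mode_eq_max (xs : List Int) (hxs : xs ≠ []) :
    ∃ v, PySem.List.max? (PySem.Dict.counter xs).keys
           (fun k => (PySem.Dict.counter xs).getD k 0) = some v ∧
         pyMostCommon1? (PySem.Dict.counter xs).items
           = some (v, (PySem.Dict.counter xs).getD v 0) ∧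
         1 ≤ (PySem.Dict.counter xs).getD v 0 := by
  set c := PySem.Dict.counter xs with hc
  have hitems : c.items = c.keys.map (fun k => (k, c.getD k 0)) :=
    PySem.Dict.items_eq_map_keys c (by rw [hc]; exact PySem.Dict.nodup_keys_counter xs) 0
  have hkeys_ne : c.keys ≠ [] := by
    rw [hc, PySem.Dict.keys_counter]
    cases xs with
    | nil => exact absurd rfl hxs
    | cons x t =>
        intro hnil
        have := (PySem.Set.mem_ofList (x :: t) x).mpr (by simp)
        rw [hnil] at this
        simp at this
  obtain ⟨v, hv⟩ : ∃ v, PySem.List.max? c.keys (fun k => c.getD k 0) = some v := by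
    cases hmx : PySem.List.max? c.keys (fun k => c.getD k 0) with
    | none => exact absurd ((PySem.List.max?_eq_none_iff _ _).mp hmx) hkeys_ne
    | some v => exact ⟨v, rfl⟩
  refine ⟨v, hv, ?_, ?_⟩
  · rw [hitems, mostCommon1_map, hv, Option.map_some]
  · have hvmem : v ∈ c.keys := PySem.List.max?_mem hv
    have hvxs : v ∈ xs := by
      rw [hc, PySem.Dict.keys_counter] at hvmem
      exact (PySem.Set.mem_ofList _ _).mp hvmem
    have : c.getD v 0 = (xs.count v : Int) := by rw [hc]; exact PySem.Dict.getD_counter xs v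
    rw [this]
    exact_mod_cast List.count_pos_iff.mpr hvxs

-- the invariant tying A's (dict, most_common) state to B's Option (count, attribute, value)
def StRel (st : PySem.Dict String Int × Int) (o : Option (Int × String × Int)) : Prop :=
  (st = (PySem.Dict.empty, 0) ∧ o = none) ∨
  (∃ m a v, o = some (m, a, v) ∧ st = ((PySem.Dict.empty).insert a v, m) ∧ 1 ≤ m)

-- the two selection folds stay related
lemma fold_rel (concept_objects : List (List (String × Int)))
    (hco : concept_objects ≠ [])
    (hnd : ∀ o ∈ concept_objects, (o.map Prod.fst).Nodup)
    (attrs : List String)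
    (hmem : ∀ a ∈ attrs, ∀ o ∈ concept_objects, a ∈ o.map Prod.fst)
    (st : PySem.Dict String Int × Int) (o : Option (Int × String × Int))
    (hrel : StRel st o) :
    StRel
      (attrs.foldl
        (fun (st : PySem.Dict String Int × Int) attr =>
          let column := get_concept_column concept_objects attr
          match pyMostCommon1? (PySem.Dict.counter column).items with
          | none => st
          | some m => if m.2 > st.2 then ((PySem.Dict.empty).insert attr m.1, m.2) else st)
        st)
      (attrs.foldl
        (fun (best : Option (Int × String × Int)) attr =>
          let inner := (bCounts concept_objects).getD attr PySem.Dict.empty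
          match PySem.List.max? inner.keys (fun v => inner.getD v 0) with
          | none => best
          | some v =>
            match best with
            | none => some (inner.getD v 0, attr, v)
            | some b => if inner.getD v 0 > b.1 then some (inner.getD v 0, attr, v) else best)
        o) := by
  induction attrs generalizing st o with
  | nil => exact hrel
  | cons a rest ih =>
      simp only [List.foldl_cons]
      apply ih (fun x hx => hmem x (List.mem_cons_of_mem _ hx))
      have ha : a ∈ a :: rest := List.mem_cons_self
      have hcol_ne : get_concept_column concept_objects a ≠ [] := by
        cases concept_objects with
        | nil => exact absurd rfl hco
        | cons r t =>
            intro hnil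
            have : get_concept_column (r :: t) a
                = (r :: t).map (fun o => (PySem.Dict.mk o).getD a 0) := by
              unfold get_concept_column
              simpa using PySem.List.foldl_append_singleton_eq_map
                (fun o => (PySem.Dict.mk o).getD a 0) (r :: t) []
            rw [this] at hnil
            simp at hnil
      obtain ⟨v, hmax, hmode, hpos⟩ := mode_eq_max _ hcol_ne
      have htab : (bCounts concept_objects).getD a PySem.Dict.empty
          = PySem.Dict.counter (get_concept_column concept_objects a) :=
        bcounts_eq_counter concept_objects a hnd (fun x hx => hmem a ha x hx)
      simp only [htab, hmode, hmax]
      rcases hrel with ⟨hst, ho⟩ | ⟨m, a0, v0, ho, hst, hm⟩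
      · subst hst; subst ho
        rw [if_pos (by simpa using hpos)]
        exact Or.inr ⟨_, _, _, rfl, rfl, hpos⟩
      · subst ho; subst hst
        simp only
        by_cases h : (PySem.Dict.counter (get_concept_column concept_objects a)).getD v 0 > m
        · rw [if_pos h, if_pos h]
          exact Or.inr ⟨_, _, _, rfl, rfl, hpos⟩
        · rw [if_neg h, if_neg h]
          exact Or.inr ⟨_, _, _, rfl, rfl, hm⟩

-- ===== VERDICT (by name: the statement is the Claim_ definition above) =====
theorem get_descriptor_spec : Claim_equal_get_descriptor := by
  intro concept_objects attributes _hdom hpre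
  obtain ⟨hne, hnd, hmem⟩ := hpre
  unfold Spec_get_descriptor get_descriptor get_descriptor_alt
  cases attributes with
  | nil => rfl
  | cons a rest =>
      have hco : concept_objects ≠ [] := hne (by simp)
      have := fold_rel concept_objects hco hnd (a :: rest) hmem
        (PySem.Dict.empty, 0) none (Or.inl ⟨rfl, rfl⟩)
      rcases this with ⟨hst, ho⟩ | ⟨m, a0, v0, ho, hst, _⟩
      · simp only [ho, hst]
      · simp only [ho, hst]
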